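-- pv_equiv track=rewrite | github.com/1475505/Miliastra-toolbox-primitive-shape | primitive_backend.py | _build_shape_configs
-- ===== SOURCE A (Python) =====
-- SHAPE_MODE_MAP = {"triangle": 1, "rect": 5, "circle": 7}
--
-- SHAPE_ORDER = ("circle", "rect", "triangle")
--
-- def _normalize_allowed_shapes(allowed_shapes):
--     requested = [str(name).strip().lower() for name in (allowed_shapes or ["circle"])]
--     normalized = []
--     for name in SHAPE_ORDER:
--         if name in requested and name not in normalized:
--             normalized.append(name)
--     for name in requested:
--         if name in SHAPE_MODE_MAP and name not in normalized:
--             normalized.append(name)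
--     return normalized or ["circle"]
--
-- def _build_shape_configs(allowed_shapes, num_primitives):
--     normalized = _normalize_allowed_shapes(allowed_shapes)
--     total = max(1, int(num_primitives))
--     base = total // len(normalized)
--     remainder = total % len(normalized)
--     configs = []
--     for index, shape_name in enumerate(normalized):
--         count = base + (1 if index < remainder else 0)
--         if count <= 0:
--             continue
--         configs.append((SHAPE_MODE_MAP[shape_name], count))
--     return configs or [(SHAPE_MODE_MAP["circle"], total)]
-- ===== SOURCE B (Python) =====
-- SHAPE_MODE_MAP = {"triangle": 1, "rect": 5, "circle": 7}
--
-- SHAPE_ORDER = ("circle", "rect", "triangle")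
--
--
-- def _distribute(total, names):
--     # greedy ceiling split: first shape takes ceil(total/len(names)), recurse on the rest
--     if not names or total <= 0:
--         return []
--     count = -(-total // len(names))
--     return [(SHAPE_MODE_MAP[names[0]], count)] + _distribute(total - count, names[1:])
--
--
-- def _build_shape_configs(allowed_shapes, num_primitives):
--     requested = {str(name).strip().lower() for name in (allowed_shapes or ["circle"])}
--     shapes = [name for name in SHAPE_ORDER if name in requested] or ["circle"]
--     return _distribute(max(1, int(num_primitives)), shapes)
-- ===== Notes on version B (the rewrite author's own statement) =====
-- stated objective: alternative
-- what changed: B replaces A's closed-form base/remainder distribution (enumerate loop with a skip guard and a dead empty fallback) by a recursive greedy split - the first shape takes ceil(total/len(names)) and the remainder is distributed recursively over the tail - and builds the shape list by filtering SHAPE_ORDER against a set of the requested names, dropping A's provably-dead second normalization pass.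
import Mathlib
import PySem

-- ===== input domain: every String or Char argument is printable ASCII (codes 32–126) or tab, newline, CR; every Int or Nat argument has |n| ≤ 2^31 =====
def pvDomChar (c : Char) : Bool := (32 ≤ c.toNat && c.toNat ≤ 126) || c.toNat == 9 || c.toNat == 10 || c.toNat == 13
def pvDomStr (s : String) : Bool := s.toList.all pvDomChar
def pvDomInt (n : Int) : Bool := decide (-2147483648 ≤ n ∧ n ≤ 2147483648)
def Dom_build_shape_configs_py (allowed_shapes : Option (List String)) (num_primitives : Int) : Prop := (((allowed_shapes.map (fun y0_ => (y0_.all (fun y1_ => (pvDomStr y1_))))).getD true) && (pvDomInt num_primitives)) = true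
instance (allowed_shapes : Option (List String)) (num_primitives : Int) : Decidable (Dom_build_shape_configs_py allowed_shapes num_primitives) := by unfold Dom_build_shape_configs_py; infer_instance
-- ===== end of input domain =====

-- B replaces A's closed-form base/remainder split (enumerate loop + skip guard + dead
-- fallback) by a recursive greedy distribution — the first shape takes ceil(total/len),
-- recurse on the rest — and filters SHAPE_ORDER against a set of the requested names.

-- SHAPE_MODE_MAP
def pvShapeModes : PySem.Dict String Int :=
  PySem.Dict.ofList [("triangle", 1), ("rect", 5), ("circle", 7)]

-- SHAPE_ORDER
def pvShapeOrder : List String := ["circle", "rect", "triangle"]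

-- [str(name).strip().lower() for name in (allowed_shapes or ["circle"])]
-- (identical subexpression of both Pythons; str() is the identity on the String inputs)
def pvRequestedList (allowed_shapes : Option (List String)) : List String :=
  (match allowed_shapes with
   | none => ["circle"]
   | some l => if l.isEmpty then ["circle"] else l).map
    (fun n => PySem.Str.lower (PySem.Str.strip n))

-- ===== PORT A =====
def normalize_allowed_shapes (allowed_shapes : Option (List String)) : List String :=
  let requested := pvRequestedList allowed_shapes
  let normalized := pvShapeOrder.foldl
    (fun acc name => if requested.contains name && !acc.contains name then acc ++ [name] else acc) []
  let normalized := requested.foldl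
    (fun acc name => if pvShapeModes.contains name && !acc.contains name then acc ++ [name] else acc) normalized
  if normalized.isEmpty then ["circle"] else normalized

def build_shape_configs_py (allowed_shapes : Option (List String)) (num_primitives : Int) : List (Int × Int) :=
  let normalized := normalize_allowed_shapes allowed_shapes
  let total := max 1 num_primitives     -- int(num_primitives) is the identity on Int
  let base := PySem.Int.floordiv total (normalized.length : Int)
  let remainder := PySem.Int.mod total (normalized.length : Int)
  let configs := (PySem.List.enumerate normalized).foldl
    (fun cfg p =>
      let count := base + (if p.1 < remainder then (1 : Int) else 0)
      if count ≤ 0 then cfg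
      -- SHAPE_MODE_MAP[shape_name]: the key is always present (normalized ⊆ map keys), so getD 0 is exact
      else cfg ++ [(pvShapeModes.getD p.2 0, count)]) []
  if configs.isEmpty then [(pvShapeModes.getD "circle" 0, total)] else configs

-- ===== PORT B =====
-- _distribute(total, names): greedy ceiling split, recursion on the tail of names
def distribute_alt : Int → List String → List (Int × Int)
  | _, [] => []
  | total, a :: rest =>
    if total ≤ 0 then []
    else
      -- count = -(-total // len(names))
      let count := -(PySem.Int.floordiv (-total) ((a :: rest).length : Int))
      -- SHAPE_MODE_MAP[names[0]]: key always present, so getD 0 is exact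
      [(pvShapeModes.getD a 0, count)] ++ distribute_alt (total - count) rest

def requested_shapes_alt (allowed_shapes : Option (List String)) : List String :=
  -- requested = {str(name).strip().lower() for name in (allowed_shapes or ["circle"])}
  let requested : PySem.Set String := PySem.Set.ofList (pvRequestedList allowed_shapes)
  let out := pvShapeOrder.filter (fun name => PySem.Set.contains requested name)
  if out.isEmpty then ["circle"] else out

def build_shape_configs_py_alt (allowed_shapes : Option (List String)) (num_primitives : Int) : List (Int × Int) :=
  distribute_alt (max 1 num_primitives) (requested_shapes_alt allowed_shapes)

-- ===== PRECONDITION & SPEC =====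
def Spec_build_shape_configs_py (allowed_shapes : Option (List String)) (num_primitives : Int) (out : List (Int × Int)) : Prop := out = build_shape_configs_py_alt allowed_shapes num_primitives
instance (allowed_shapes : Option (List String)) (num_primitives : Int) (out : List (Int × Int)) : Decidable (Spec_build_shape_configs_py allowed_shapes num_primitives out) := by unfold Spec_build_shape_configs_py; infer_instance

-- ===== CLAIM (what is proved, stated in full; the proofs are below) =====
def Claim_equal_build_shape_configs_py : Prop := ∀ (allowed_shapes : Option (List String)) (num_primitives : Int), Dom_build_shape_configs_py allowed_shapes num_primitives → Spec_build_shape_configs_py allowed_shapes num_primitives (build_shape_configs_py allowed_shapes num_primitives)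

-- ===== LEMMAS AND PROOFS =====

-- A's second normalization loop never adds anything: every SHAPE_MODE_MAP key that
-- occurs in the iterated list is already in the accumulator.
theorem second_loop_id (l : List String) (acc : List String)
    (h : ∀ n ∈ l, pvShapeModes.contains n = true → acc.contains n = true) :
    l.foldl (fun acc name => if pvShapeModes.contains name && !acc.contains name then acc ++ [name] else acc) acc = acc := by
  induction l with
  | nil => rfl
  | cons a l ih =>
    simp only [List.foldl_cons]
    have hc : (pvShapeModes.contains a && !acc.contains a) = false := by
      by_cases hm : pvShapeModes.contains a = true
      · simp only [hm, Bool.true_and, Bool.not_eq_false']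
        exact h a (by simp) hm
      · simp [hm]
    rw [hc]
    simp only [Bool.false_eq_true, if_false]
    exact ih (fun n hn => h n (by simp [hn]))

-- A's first normalization loop over the three-element SHAPE_ORDER is the filter B uses.
theorem first_loop_eq_filter (rq : List String) :
    pvShapeOrder.foldl (fun acc name => if rq.contains name && !acc.contains name then acc ++ [name] else acc) []
      = pvShapeOrder.filter (fun name => rq.contains name) := by
  by_cases hb1 : "circle" ∈ rq <;> by_cases hb2 : "rect" ∈ rq <;> by_cases hb3 : "triangle" ∈ rq <;>
    simp [pvShapeOrder, hb1, hb2, hb3]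

theorem mode_keys (n : String) (hm : pvShapeModes.contains n = true) :
    "triangle" = n ∨ "rect" = n ∨ "circle" = n := by
  have he : pvShapeModes = PySem.Dict.mk [("triangle", 1), ("rect", 5), ("circle", 7)] := by decide
  rw [he, PySem.Dict.contains_mk] at hm
  simpa using hm

theorem set_contains_ofList (rq : List String) (n : String) :
    PySem.Set.contains (PySem.Set.ofList rq) n = rq.contains n := by
  by_cases h : n ∈ rq <;> simp [PySem.Set.contains_eq_listContains, PySem.Set.mem_ofList, h]

-- the two normalizations agree
theorem norm_eq (as : Option (List String)) :
    normalize_allowed_shapes as = requested_shapes_alt as := by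
  unfold normalize_allowed_shapes requested_shapes_alt
  generalize pvRequestedList as = rq
  simp only [set_contains_ofList, first_loop_eq_filter]
  rw [second_loop_id]
  intro n hn hm
  have hcn : n ∈ pvShapeOrder := by
    rcases mode_keys n hm with rfl|rfl|rfl <;> simp [pvShapeOrder]
  simp [List.mem_filter, hcn, hn]

theorem alt_shapes_ne_nil (as : Option (List String)) : requested_shapes_alt as ≠ [] := by
  unfold requested_shapes_alt
  simp only []
  split
  · simp
  · next h => simpa [List.isEmpty_iff] using h

-- 'if count <= 0: continue; append' as filter+map
theorem foldl_skip_append {α β : Type} (p : α → Prop) [DecidablePred p] (f : α → β)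
    (l : List α) (acc : List β) :
    l.foldl (fun cfg x => if p x then cfg else cfg ++ [f x]) acc
      = acc ++ (l.filter (fun x => !decide (p x))).map f := by
  induction l generalizing acc with
  | nil => simp
  | cons a l ih =>
    by_cases h : p a <;> simp [h, ih]

theorem filter_enum_none (s : List String) (st c : Int) (h : c ≤ st) :
    (PySem.List.enumerate s st).filter (fun p => decide (p.1 < c)) = [] := by
  induction s generalizing st with
  | nil => simp [PySem.List.enumerate_nil]
  | cons a s ih =>
    rw [PySem.List.enumerate_cons]
    simp only [List.filter_cons]
    rw [if_neg (by simp; omega)]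
    exact ih (st + 1) (by omega)

theorem filter_enum_take (s : List String) (st : Int) (k : Nat) :
    (PySem.List.enumerate s st).filter (fun p => decide (p.1 < st + (k : Int)))
      = PySem.List.enumerate (s.take k) st := by
  induction s generalizing st k with
  | nil => simp [PySem.List.enumerate_nil]
  | cons a s ih =>
    cases k with
    | zero =>
      simpa using filter_enum_none (a :: s) st st (le_refl st)
    | succ k =>
      rw [PySem.List.enumerate_cons, List.take_succ_cons, PySem.List.enumerate_cons]
      simp only [List.filter_cons]
      rw [if_pos (by simp)]
      have h2 := ih (st + 1) k
      rw [show st + ((k + 1 : Nat) : Int) = (st + 1) + (k : Int) by push_cast; ring]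
      rw [h2]

-- proof-only cores: A's builder with the normalized list abstracted, and an explicit
-- closed form of the distribution both builders are reduced to
def pvACore (s : List String) (num_primitives : Int) : List (Int × Int) :=
  let total := max 1 num_primitives
  let base := PySem.Int.floordiv total (s.length : Int)
  let remainder := PySem.Int.mod total (s.length : Int)
  let configs := (PySem.List.enumerate s).foldl
    (fun cfg p =>
      let count := base + (if p.1 < remainder then (1 : Int) else 0)
      if count ≤ 0 then cfg
      else cfg ++ [(pvShapeModes.getD p.2 0, count)]) []
  if configs.isEmpty then [(pvShapeModes.getD "circle" 0, total)] else configs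

def pvBCore (s : List String) (total : Int) : List (Int × Int) :=
  if total / (s.length : Int) = 0 then
    (s.take (total % (s.length : Int)).toNat).map (fun name => (pvShapeModes.getD name 0, (1 : Int)))
  else
    List.zip (s.map (fun name => pvShapeModes.getD name 0))
      (List.replicate (total % (s.length : Int)).toNat (total / (s.length : Int) + 1)
        ++ List.replicate (s.length - (total % (s.length : Int)).toNat) (total / (s.length : Int)))

theorem dist_eq (s : List String) (hs : s ≠ []) (np : Int) :
    pvACore s np = pvBCore s (max 1 np) := by
  have hlen : 0 < ((s.length : Int)) := by
    have := List.length_pos_iff.mpr hs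
    exact_mod_cast this
  unfold pvACore pvBCore
  dsimp only
  rw [PySem.Int.floordiv_eq_ediv_of_pos hlen, PySem.Int.mod_eq_emod_of_pos hlen]
  set T := max 1 np with hT
  have ht : 1 ≤ T := le_max_left _ _
  set n : Int := (s.length : Int) with hn
  set q := T / n with hq
  set r := T % n with hr
  have hr0 : 0 ≤ r := by rw [hr]; exact Int.emod_nonneg T (by omega)
  have hrn : r < n := by rw [hr]; exact Int.emod_lt_of_pos T (by omega)
  have hq0 : 0 ≤ q := by
    rw [hq]; exact Int.ediv_nonneg (by omega) (by omega)
  have hTqr : n * q + r = T := by rw [hq, hr]; exact Int.mul_ediv_add_emod T n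
  rw [show (PySem.List.enumerate s).foldl
      (fun cfg p =>
        let count := q + (if p.1 < r then (1 : Int) else 0)
        if count ≤ 0 then cfg
        else cfg ++ [(pvShapeModes.getD p.2 0, count)]) []
      = ((PySem.List.enumerate s).filter
          (fun p => !decide (q + (if p.1 < r then (1 : Int) else 0) ≤ 0))).map
          (fun p => (pvShapeModes.getD p.2 0, q + (if p.1 < r then (1 : Int) else 0)))
    from by
      simpa using foldl_skip_append
        (fun p : Int × String => q + (if p.1 < r then (1 : Int) else 0) ≤ 0)
        (fun p : Int × String => (pvShapeModes.getD p.2 0, q + (if p.1 < r then (1 : Int) else 0)))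
        (PySem.List.enumerate s) []]
  by_cases hqz : q = 0
  · -- fewer primitives than shapes: only the first r shapes get one primitive each
    rw [hqz] at hTqr ⊢
    have hrT : r = T := by
      have : n * 0 = 0 := by ring
      omega
    have hr1 : 1 ≤ r := by omega
    rw [if_pos rfl]
    have hpred : ∀ p : Int × String,
        (!decide ((0:Int) + (if p.1 < r then (1:Int) else 0) ≤ 0)) = decide (p.1 < r) := by
      intro p; by_cases h : p.1 < r <;> simp [h]
    simp only [hpred]
    rw [show r = ((r.toNat : Int)) by omega]
    have htake := filter_enum_take s 0 r.toNat
    simp only [zero_add] at htake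
    rw [htake]
    have hmap : (PySem.List.enumerate (List.take r.toNat s)).map
        (fun p => (pvShapeModes.getD p.2 0, (0:Int) + (if p.1 < ((r.toNat : Int)) then (1:Int) else 0)))
        = (List.take r.toNat s).map (fun name => (pvShapeModes.getD name 0, (1:Int))) := by
      rw [List.map_congr_left (g := fun p : Int × String => (pvShapeModes.getD p.2 0, (1:Int)))]
      · rw [show (fun p : Int × String => (pvShapeModes.getD p.2 0, (1:Int)))
            = ((fun name => (pvShapeModes.getD name 0, (1:Int))) ∘ Prod.snd) from rfl]
        rw [← List.map_map, PySem.List.map_snd_enumerate]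
      · intro p hp
        rcases (PySem.List.mem_enumerate_iff _ _ _).mp hp with ⟨k, hk, rfl⟩
        have hkr : k < r.toNat := by
          have := List.length_take_le r.toNat s
          omega
        have hkr2 : (k : Int) < r := by omega
        simp [hkr2]
    rw [hmap]
    have htne : List.take r.toNat s ≠ [] := by
      apply List.ne_nil_of_length_pos
      have : 0 < s.length := List.length_pos_iff.mpr hs
      simp [List.length_take]
      omega
    rw [if_neg (by simp [List.isEmpty_iff]; exact ⟨by omega, hs⟩)]
    rw [Int.toNat_natCast]
  · -- at least one primitive per shape: every index is kept
    rw [if_neg hqz]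
    have hq1 : 1 ≤ q := by omega
    have hpred : ∀ p : Int × String,
        (!decide (q + (if p.1 < r then (1:Int) else 0) ≤ 0)) = true := by
      intro p; by_cases h : p.1 < r <;> simp [h] <;> omega
    simp only [hpred, List.filter_true]
    have hene : (PySem.List.enumerate s) ≠ [] := by
      apply List.ne_nil_of_length_pos
      rw [PySem.List.length_enumerate]
      exact List.length_pos_iff.mpr hs
    rw [if_neg (by simp [List.isEmpty_iff, hene])]
    have hrle : r.toNat ≤ s.length := by omega
    apply List.ext_getElem
    · simp [PySem.List.length_enumerate, List.length_zip]
      omega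
    · intro i h1 h2
      simp only [List.getElem_map, PySem.List.getElem_enumerate, List.getElem_zip]
      have hlen1 : i < s.length := by
        simpa [PySem.List.length_enumerate] using h1
      by_cases hi : i < r.toNat
      · rw [List.getElem_append_left (by simpa [List.length_replicate] using hi)]
        have hir : (i : Int) < r := by omega
        simp [hir]
      · rw [List.getElem_append_right (by simpa [List.length_replicate] using hi)]
        have hir : ¬ ((i : Int) < r) := by omega
        simp [List.length_replicate, hir]

-- unfolding lemma for the cons case of the recursion
theorem distribute_alt_cons (t : Int) (a : String) (rest : List String) :
    distribute_alt t (a :: rest) =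
      if t ≤ 0 then [] else
        [(pvShapeModes.getD a 0, -(PySem.Int.floordiv (-t) ((a :: rest).length : Int)))]
          ++ distribute_alt (t - -(PySem.Int.floordiv (-t) ((a :: rest).length : Int))) rest := by
  rfl

-- B's greedy ceiling recursion computes the same closed-form distribution
theorem dist_alt_eq (s : List String) : ∀ t : Int, 0 ≤ t → s ≠ [] →
    distribute_alt t s = pvBCore s t := by
  induction s with
  | nil => intro t _ hs; exact absurd rfl hs
  | cons a rest ih =>
    intro t ht0 _
    rw [distribute_alt_cons]
    by_cases htz : t ≤ 0
    · have ht : t = 0 := by omega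
      subst ht
      rw [if_pos le_rfl]
      unfold pvBCore
      simp
    · rw [if_neg htz]
      have ht1 : 1 ≤ t := by omega
      have hlen : (0:Int) < ((a :: rest).length : Int) := by exact_mod_cast Nat.succ_pos rest.length
      obtain ⟨q, hq⟩ : ∃ q, t / ((a :: rest).length : Int) = q := ⟨_, rfl⟩
      obtain ⟨r, hr⟩ : ∃ r, t % ((a :: rest).length : Int) = r := ⟨_, rfl⟩
      have hr0 : 0 ≤ r := hr ▸ Int.emod_nonneg t (by omega)
      have hrn : r < ((a :: rest).length : Int) := hr ▸ Int.emod_lt_of_pos t hlen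
      have hq0 : 0 ≤ q := hq ▸ Int.ediv_nonneg (by omega) (by omega)
      have hTqr : ((a :: rest).length : Int) * q + r = t := by
        rw [← hq, ← hr]; exact Int.mul_ediv_add_emod t _
      have hc : -(PySem.Int.floordiv (-t) ((a :: rest).length : Int))
          = q + (if 0 < r then 1 else 0) := by
        rw [PySem.Int.neg_floordiv_neg_eq_iff_of_pos hlen]
        by_cases hrz : 0 < r
        · rw [if_pos hrz]; constructor <;> nlinarith
        · rw [if_neg hrz]; constructor <;> nlinarith
      rw [hc]
      unfold pvBCore
      rw [hq, hr]
      by_cases hqz : q = 0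
      · -- fewer primitives than shapes: the head takes 1, recurse with t - 1
        subst hqz
        rw [if_pos rfl]
        have hrt : r = t := by omega
        have hrpos : 0 < r := by omega
        rw [if_pos hrpos]
        have hrest : rest ≠ [] := by
          intro h; subst h; simp at hrn; omega
        have hm : (0:Int) < (rest.length : Int) := by
          exact_mod_cast List.length_pos_iff.mpr hrest
        have hnm : ((a :: rest).length : Int) = (rest.length : Int) + 1 := by
          push_cast [List.length_cons]; ring
        have hlt : t - 1 < (rest.length : Int) := by omega
        rw [show t - (0 + 1) = t - 1 by ring]
        rw [ih (t - 1) (by omega) hrest]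
        unfold pvBCore
        rw [Int.ediv_eq_zero_of_lt (by omega) hlt, Int.emod_eq_of_lt (by omega) hlt, if_pos rfl]
        rw [hrt, show t.toNat = (t - 1).toNat + 1 by omega]
        simp [List.take_succ_cons]
      · -- every shape takes at least q ≥ 1
        rw [if_neg hqz]
        have hq1 : 1 ≤ q := by omega
        have hsplit : ((a :: rest).length : Int) * q = (rest.length : Int) * q + q := by
          push_cast [List.length_cons]; ring
        by_cases hrest : rest = []
        · -- single shape: it takes everything, recursion ends
          subst hrest
          simp only [List.length_cons, List.length_nil, Nat.zero_add, Nat.cast_one] at hTqr hrn ⊢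
          have hr0' : r = 0 := by omega
          have hqt : q = t := by omega
          subst hr0'
          rw [if_neg (by omega)]
          rw [show t - (q + 0) = 0 by omega]
          rw [show distribute_alt 0 [] = [] from rfl]
          simp [hqt]
        · have hm : (0:Int) < (rest.length : Int) := by
            exact_mod_cast List.length_pos_iff.mpr hrest
          by_cases hrz : 0 < r
          · -- head takes q + 1; the tail splits t' = m*q + (r-1)
            rw [if_pos hrz]
            have ht' : t - (q + 1) = (r - 1) + (rest.length : Int) * q := by linarith
            have ht'0 : 0 ≤ t - (q + 1) := by
              have := le_mul_of_one_le_right (le_of_lt hm) hq1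
              linarith
            have hq' : (t - (q + 1)) / (rest.length : Int) = q := by
              rw [ht', Int.add_mul_ediv_left _ _ (by omega : ((rest.length : Int)) ≠ 0)]
              rw [Int.ediv_eq_zero_of_lt (by omega) (by
                have : ((a :: rest).length : Int) = (rest.length : Int) + 1 := by
                  push_cast [List.length_cons]; ring
                omega)]
              omega
            have hr' : (t - (q + 1)) % (rest.length : Int) = r - 1 := by
              rw [ht', Int.add_mul_emod_self_left]
              exact Int.emod_eq_of_lt (by omega) (by
                have : ((a :: rest).length : Int) = (rest.length : Int) + 1 := by
                  push_cast [List.length_cons]; ring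
                omega)
            rw [ih _ ht'0 hrest]
            unfold pvBCore
            rw [hq', hr', if_neg hqz]
            rw [show r.toNat = (r - 1).toNat + 1 by omega]
            simp [List.replicate_succ, Nat.succ_sub_succ]
          · -- r = 0: head takes q, the tail splits t' = m*q evenly
            rw [if_neg hrz]
            have hre : r = 0 := by omega
            subst hre
            have ht' : t - (q + 0) = (rest.length : Int) * q := by linarith
            have ht'0 : 0 ≤ t - (q + 0) := by
              rw [ht']; exact mul_nonneg (by omega) (by omega)
            have hq' : (t - (q + 0)) / (rest.length : Int) = q := by
              rw [ht']; exact Int.mul_ediv_cancel_left q (by omega)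
            have hr' : (t - (q + 0)) % (rest.length : Int) = 0 := by
              rw [ht']; exact Int.mul_emod_right _ _
            rw [ih _ ht'0 hrest]
            unfold pvBCore
            rw [hq', hr', if_neg hqz]
            simp [List.replicate_succ]

-- ===== VERDICT (by name: the statement is the Claim_ definition above) =====
theorem build_shape_configs_py_spec : Claim_equal_build_shape_configs_py := by
  intro as np _
  show build_shape_configs_py as np = build_shape_configs_py_alt as np
  unfold build_shape_configs_py build_shape_configs_py_alt
  rw [norm_eq]
  rw [show (let normalized := requested_shapes_alt as;
      let total := max 1 np;
      let base := PySem.Int.floordiv total (normalized.length : Int);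
      let remainder := PySem.Int.mod total (normalized.length : Int);
      let configs := (PySem.List.enumerate normalized).foldl
        (fun cfg p =>
          let count := base + (if p.1 < remainder then (1 : Int) else 0)
          if count ≤ 0 then cfg
          else cfg ++ [(pvShapeModes.getD p.2 0, count)]) []
      if configs.isEmpty then [(pvShapeModes.getD "circle" 0, total)] else configs)
      = pvACore (requested_shapes_alt as) np from rfl]
  rw [dist_eq _ (alt_shapes_ne_nil as) np]
  exact (dist_alt_eq _ _ (le_trans zero_le_one (le_max_left 1 np)) (alt_shapes_ne_nil as)).symm
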